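-- pv_equiv track=rewrite | github.com/Thedywender/trybe-exercicios | Ciencias-da-Computação/section02-algoritmos/day02-recurisvidade_estrategia_solucao_problemas/Exercicios_agora_pratica/exercise_03_maior_number_int.py | biggest_number
-- ===== SOURCE A (Python) =====
-- def biggest_number(numbers, tamanho):
--     if tamanho == 1:
--         return numbers[0]
--     else:
--         biggest = biggest_number(numbers, tamanho - 1)
--         if numbers[tamanho - 1] > biggest:
--             return numbers[tamanho - 1]
--         else:
--             return biggest
-- ===== SOURCE B (Python) =====
-- def biggest_number(numbers, tamanho):
--     biggest = numbers[0]
--     for i in range(1, tamanho):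
--         if numbers[i] > biggest:
--             biggest = numbers[i]
--     return biggest
-- ===== Notes on version B (the rewrite author's own statement) =====
-- stated objective: simpler
-- what changed: Replaced the recursion on tamanho with a single iterative left-to-right scan over numbers[1:tamanho] keeping a running maximum.
import Mathlib
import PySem

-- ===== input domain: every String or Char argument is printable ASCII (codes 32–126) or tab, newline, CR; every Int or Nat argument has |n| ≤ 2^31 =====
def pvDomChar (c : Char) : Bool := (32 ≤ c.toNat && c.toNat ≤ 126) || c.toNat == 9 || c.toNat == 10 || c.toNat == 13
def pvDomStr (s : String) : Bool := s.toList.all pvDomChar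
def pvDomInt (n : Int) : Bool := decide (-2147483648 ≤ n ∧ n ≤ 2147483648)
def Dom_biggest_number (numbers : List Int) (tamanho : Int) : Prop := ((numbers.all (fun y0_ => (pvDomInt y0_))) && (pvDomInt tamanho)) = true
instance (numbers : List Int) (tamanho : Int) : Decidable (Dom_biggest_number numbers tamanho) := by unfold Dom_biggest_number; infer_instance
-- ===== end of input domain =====

-- B replaces A's recursion on tamanho with an iterative running-maximum scan (simpler, O(1) space).
-- ===== PORT A =====
-- literal port of A's recursion; the 'tamanho ≤ 1' base is only a totality guard
-- (Python diverges/raises for tamanho ≤ 0, which Pre_ excludes)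
def biggest_number (numbers : List Int) (tamanho : Int) : Int :=
  if tamanho ≤ 1 then (PySem.List.pyGet? numbers 0).getD 0
  else
    let biggest := biggest_number numbers (tamanho - 1)
    let x := (PySem.List.pyGet? numbers (tamanho - 1)).getD 0
    if x > biggest then x else biggest
termination_by tamanho.toNat
decreasing_by omega

-- ===== PORT B =====
def biggest_number_alt (numbers : List Int) (tamanho : Int) : Int :=
  (PySem.List.pyRange 1 tamanho 1).foldl
    (fun b i => let x := (PySem.List.pyGet? numbers i).getD 0
                if x > b then x else b)
    ((PySem.List.pyGet? numbers 0).getD 0)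

-- ===== PRECONDITION & SPEC =====
-- Pre_ excludes tamanho ≤ 0 (A recurses forever: RecursionError) and tamanho > len(numbers) (IndexError).
def Pre_biggest_number (numbers : List Int) (tamanho : Int) : Prop :=
  1 ≤ tamanho ∧ tamanho ≤ numbers.length
instance (numbers : List Int) (tamanho : Int) : Decidable (Pre_biggest_number numbers tamanho) := by
  unfold Pre_biggest_number; infer_instance
def pvWitness_biggest_number : List Int × Int := ([3, 1, 7, 2], 3)
def Spec_biggest_number (numbers : List Int) (tamanho : Int) (out : Int) : Prop := out = biggest_number_alt numbers tamanho
instance (numbers : List Int) (tamanho : Int) (out : Int) : Decidable (Spec_biggest_number numbers tamanho out) := by unfold Spec_biggest_number; infer_instance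

-- ===== CLAIM (what is proved, stated in full; the proofs are below) =====
def Claim_equal_biggest_number : Prop := ∀ (numbers : List Int) (tamanho : Int), Dom_biggest_number numbers tamanho → Pre_biggest_number numbers tamanho → Spec_biggest_number numbers tamanho (biggest_number numbers tamanho)

-- ===== LEMMAS AND PROOFS =====
theorem biggest_number_eq_alt (numbers : List Int) (tamanho : Int)
    (h : 1 ≤ tamanho) : biggest_number numbers tamanho = biggest_number_alt numbers tamanho := by
  have hn : tamanho.toNat = tamanho.toNat := rfl
  induction hk : tamanho.toNat generalizing tamanho with
  | zero => omega
  | succ n ih =>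
    rw [biggest_number]
    by_cases h1 : tamanho ≤ 1
    · have : tamanho = 1 := by omega
      subst this
      simp [biggest_number_alt, PySem.List.pyRange_one_eq_nil (by omega : (1:Int) ≤ 1)]
    · have h2 : 1 ≤ tamanho - 1 := by omega
      rw [if_neg h1, ih (tamanho - 1) h2 rfl (by omega)]
      simp only [biggest_number_alt]
      have hr : PySem.List.pyRange 1 tamanho 1 = PySem.List.pyRange 1 (tamanho - 1) 1 ++ [tamanho - 1] := by
        have := PySem.List.pyRange_one_succ_right (a := 1) (b := tamanho - 1) (by omega)
        simpa [show tamanho - 1 + 1 = tamanho by omega] using this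
      rw [hr, List.foldl_append]
      simp

theorem biggest_number_spec : Claim_equal_biggest_number := by
  intro numbers tamanho _ hpre
  unfold Spec_biggest_number
  exact biggest_number_eq_alt numbers tamanho hpre.1
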